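-- pv_equiv track=rewrite | github.com/abeaumont/competitive-programming | gcj/2018-round-1c/a-whole-new-word.py | f
-- ===== SOURCE A (Python) =====
-- def f(a, b, l, t, i):
--     if i == l:
--         x = ''.join(t)
--         if x not in a: return x
--         return
--     for c in b[i]:
--         t.append(c)
--         x = f(a, b, l, t, i + 1)
--         if x is not None: return x
--         t.pop()
-- ===== SOURCE B (Python) =====
-- def f(a, b, l, t, i):
--     # Two-phase iterative enumeration instead of A's backtracking DFS:
--     # (1) walk the columns b[i], b[i+1], ... until j == l (an empty column
--     #     means no word exists at all -> None);
--     # (2) enumerate the candidate words by arithmetic unranking: candidate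
--     #     r (r = 0..m-1, m = product of column sizes) is decoded into one
--     #     character per column, most significant digit first, so the last
--     #     column varies fastest -- exactly A's DFS order.
--     # Like A, on success t is extended to the found word; on failure t is
--     # left untouched.
--     cols = []
--     j = i
--     while j != l:
--         col = b[j]
--         if not col:
--             return None
--         cols.append(col)
--         j += 1
--     m = 1
--     for col in cols:
--         m *= len(col)
--     for r in range(m):
--         tail = []
--         q = r
--         rad = m
--         for col in cols:
--             rad //= len(col)
--             tail.append(col[q // rad])
--             q %= rad
--         x = ''.join(t + tail)
--         if x not in a:
--             t.extend(tail)
--             return x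
--     return None
-- ===== Notes on version B (the rewrite author's own statement) =====
-- stated objective: alternative
-- what changed: Replaces A's backtracking DFS recursion with a two-phase iterative enumeration: an index loop collects the columns b[i..] until l (returning None as soon as a column is empty), then each candidate rank r = 0..m-1 is decoded arithmetically (mixed-radix digits, last column fastest, exactly A's DFS order) and the first decoded word not in a is returned; Pre_f excludes only the inputs on which both programs raise IndexError (the column walk runs off the end of b).
import Mathlib
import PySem

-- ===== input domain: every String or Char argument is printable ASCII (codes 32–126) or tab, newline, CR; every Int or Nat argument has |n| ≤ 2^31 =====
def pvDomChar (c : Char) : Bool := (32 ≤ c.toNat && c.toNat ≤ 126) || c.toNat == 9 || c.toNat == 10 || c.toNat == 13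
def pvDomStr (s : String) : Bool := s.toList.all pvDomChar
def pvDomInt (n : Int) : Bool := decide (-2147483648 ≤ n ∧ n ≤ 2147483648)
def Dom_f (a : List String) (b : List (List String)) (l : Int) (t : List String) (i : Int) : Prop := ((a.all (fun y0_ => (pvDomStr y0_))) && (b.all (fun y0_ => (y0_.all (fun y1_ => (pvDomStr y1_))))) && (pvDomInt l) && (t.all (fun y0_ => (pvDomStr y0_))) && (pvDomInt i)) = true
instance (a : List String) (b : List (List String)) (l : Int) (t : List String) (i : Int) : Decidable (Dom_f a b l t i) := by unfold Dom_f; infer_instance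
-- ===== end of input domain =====

-- B replaces A's backtracking DFS recursion with a two-phase iterative
-- enumeration: walk the columns b[i..] until l (an empty column means None),
-- then decode each candidate rank r = 0..m-1 arithmetically into a word
-- (mixed-radix digits, last column fastest = A's DFS order).  Objective:
-- alternative algorithm, similar cost.  Only the RETURN value is proved equal;
-- both Pythons also mutate t identically (extended to the found word on
-- success, restored on failure).

-- ===== PORT A =====
-- fuel = (len(b) - i) + 1 bounds the recursion depth: the DFS only recurses
-- past index j when b[j] is a nonempty column, which requires j < len(b).
def fGo (a : List String) (b : List (List String)) (l : Int) :
    Nat → List String → Int → Option String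
  | fuel, t, i =>
    if i = l then
      let x := PySem.Str.join "" t
      if a.contains x then none else some x
    else
      match fuel with
      | 0 => none
      | n + 1 =>
        match PySem.List.pyGet? b i with
        | none => none  -- Python raises IndexError here; excluded by Pre_f
        | some col => col.findSome? (fun c => fGo a b l n (t ++ [c]) (i + 1))

def f (a : List String) (b : List (List String)) (l : Int) (t : List String) (i : Int) : Option String :=
  fGo a b l (((b.length : Int) - i).toNat + 1) t i

-- ===== PORT B =====
-- the 'while j != l' column walk; same depth bound as A's recursion (the walk
-- only continues past j when b[j] is a nonempty column, so j < len(b)).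
-- none = IndexError (excluded by Pre_f); some none = Source B's 'return None' on
-- an empty column; some (some cols) = the collected columns.
def walkCols (b : List (List String)) (l : Int) :
    Nat → Int → Option (Option (List (List String)))
  | fuel, j =>
    if j = l then some (some [])
    else
      match fuel with
      | 0 => none
      | m + 1 =>
        match PySem.List.pyGet? b j with
        | none => none
        | some [] => some none
        | some (c :: cs) => (walkCols b l m (j + 1)).map (Option.map (fun cols => (c :: cs) :: cols))

-- one step of Source B's inner 'for col in cols' decode loop; state (q, rad, tail).
-- In Source B the index col[q // rad] is always in range, so getD with a dummy
-- default is exact there.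
def decodeStep (st : Int × Int × List String) (col : List String) : Int × Int × List String :=
  let rad := PySem.Int.floordiv st.2.1 (col.length : Int)
  (PySem.Int.mod st.1 rad, rad, st.2.2 ++ [col.getD (PySem.Int.floordiv st.1 rad).toNat ""])

def decodeTail (cols : List (List String)) (m r : Int) : List String :=
  (cols.foldl decodeStep (r, m, [])).2.2

def f_alt (a : List String) (b : List (List String)) (l : Int) (t : List String) (i : Int) : Option String :=
  match walkCols b l (((b.length : Int) - i).toNat + 1) i with
  | none => none        -- IndexError in the column walk; excluded by Pre_f
  | some none => none   -- an empty column: no candidate word exists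
  | some (some cols) =>
    let m : Int := cols.foldl (fun acc col => acc * (col.length : Int)) 1
    (PySem.List.pyRange 0 m 1).findSome? (fun r =>
      let tail := decodeTail cols m r
      let x := PySem.Str.join "" (t ++ tail)
      if a.contains x then none else some x)

-- ===== PRECONDITION & SPEC =====
-- Pre_f excludes exactly the inputs on which the Python (both A and B) raises
-- IndexError: the column walk from i must start in range and either reach l
-- or an empty column before running off the end of b.  (The two ports happen
-- to agree even there — both map the raise to none — so the proof below does
-- not consume the hypothesis; Pre_f is still stated because on those inputs
-- the Pythons raise rather than return the ports' value.)
def Pre_f (a : List String) (b : List (List String)) (l : Int) (t : List String) (i : Int) : Prop :=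
  i = l ∨ (-(b.length : Int) ≤ i ∧ i < (b.length : Int) ∧
    ((i ≤ l ∧ l ≤ (b.length : Int)) ∨
     ∃ k : Nat, k < ((b.length : Int) - i).toNat ∧ PySem.List.pyGet? b (i + k) = some []))
instance (a : List String) (b : List (List String)) (l : Int) (t : List String) (i : Int) : Decidable (Pre_f a b l t i) := by unfold Pre_f; infer_instance

def pvWitness_f : List String × List (List String) × Int × List String × Int :=
  (["AA"], [["A", "B"], ["A"]], 2, [], 0)

def Spec_f (a : List String) (b : List (List String)) (l : Int) (t : List String) (i : Int) (out : Option String) : Prop := out = f_alt a b l t i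
instance (a : List String) (b : List (List String)) (l : Int) (t : List String) (i : Int) (out : Option String) : Decidable (Spec_f a b l t i out) := by unfold Spec_f; infer_instance

-- ===== CLAIM (what is proved, stated in full; the proofs are below) =====
def Claim_equal_f : Prop := ∀ (a : List String) (b : List (List String)) (l : Int) (t : List String) (i : Int), Dom_f a b l t i → Pre_f a b l t i → Spec_f a b l t i (f a b l t i)

-- ===== LEMMAS AND PROOFS =====

-- the list of all words over the columns, first column varying slowest
-- (exactly A's DFS visiting order)
def prodCols : List (List String) → List (List String)
  | [] => [[]]
  | col :: rest => col.flatMap (fun c => (prodCols rest).map (fun tl => c :: tl))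

-- the first word of prodCols not in a, prefixed by t
def pick (a t : List String) (cols : List (List String)) : Option String :=
  (prodCols cols).findSome? (fun tail =>
    if a.contains (PySem.Str.join "" (t ++ tail)) then none
    else some (PySem.Str.join "" (t ++ tail)))

-- structural form of Source B's decode loop
def digits : List (List String) → Int → Int → List String
  | [], _, _ => []
  | col :: rest, q, rad =>
    let rad' := PySem.Int.floordiv rad (col.length : Int)
    col.getD (PySem.Int.floordiv q rad').toNat "" :: digits rest (PySem.Int.mod q rad') rad'

def colProd (cols : List (List String)) : Nat := (cols.map List.length).prod

theorem decodeTail_eq_digits (cols : List (List String)) :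
    ∀ (q rad : Int) (acc : List String),
      (cols.foldl decodeStep (q, rad, acc)).2.2 = acc ++ digits cols q rad := by
  induction cols with
  | nil => intro q rad acc; simp [digits]
  | cons col rest ih =>
    intro q rad acc
    simp only [List.foldl_cons, decodeStep, digits, ih, List.append_assoc, List.singleton_append]

theorem foldl_mul_len (cols : List (List String)) :
    ∀ init : Int, cols.foldl (fun acc col => acc * (col.length : Int)) init
      = init * ((colProd cols : Nat) : Int) := by
  induction cols with
  | nil => intro init; simp [colProd]
  | cons col rest ih =>
    intro init
    simp only [List.foldl_cons, ih, colProd, List.map_cons, List.prod_cons]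
    push_cast
    ring

theorem range_mul_flatMap (a b : Nat) :
    List.range (a * b) = (List.range a).flatMap (fun d => (List.range b).map (fun e => d * b + e)) := by
  induction a with
  | zero => simp
  | succ a ih =>
    rw [Nat.succ_mul, List.range_add, ih, List.range_succ, List.flatMap_append]
    simp

theorem findSome?_flatMap {α β γ : Type} (xs : List α) (g : α → List β) (h : β → Option γ) :
    (xs.flatMap g).findSome? h = xs.findSome? (fun x => (g x).findSome? h) := by
  induction xs with
  | nil => rfl
  | cons x xs ih =>
    simp only [List.flatMap_cons, List.findSome?_append, ih, List.findSome?_cons]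
    cases List.findSome? h (g x) <;> rfl

theorem pick_cons (a t : List String) (col : List String) (cols : List (List String)) :
    pick a t (col :: cols) = col.findSome? (fun c => pick a (t ++ [c]) cols) := by
  unfold pick
  simp only [prodCols, findSome?_flatMap, List.findSome?_map]
  congr 1
  funext c
  congr 1
  funext tl
  simp [Function.comp, List.append_assoc]

-- A's DFS equals B's walk followed by a scan of prodCols, for any fuel
theorem fGo_eq (a : List String) (b : List (List String)) (l : Int) :
    ∀ (fuel : Nat) (t : List String) (i : Int),
      fGo a b l fuel t i
        = match walkCols b l fuel i with
          | none => none
          | some none => none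
          | some (some cols) => pick a t cols := by
  intro fuel
  induction fuel with
  | zero =>
    intro t i
    rw [fGo, walkCols]
    by_cases h : i = l
    · simp only [h, if_pos]
      simp [pick, prodCols]
    · simp [h]
  | succ m ih =>
    intro t i
    rw [fGo, walkCols]
    by_cases h : i = l
    · simp only [h, if_pos]
      simp [pick, prodCols]
    · simp only [if_neg h]
      cases hg : PySem.List.pyGet? b i with
      | none => rfl
      | some col =>
        cases col with
        | nil => rfl
        | cons c cs =>
          cases hW : walkCols b l m (i + 1) with
          | none =>
            simp only [Option.map_none]
            rw [List.findSome?_eq_none_iff.2]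
            intro c' _
            rw [ih (t ++ [c']) (i + 1), hW]
          | some o =>
            cases o with
            | none =>
              simp only [Option.map_some, Option.map_none]
              rw [List.findSome?_eq_none_iff.2]
              intro c' _
              rw [ih (t ++ [c']) (i + 1), hW]
            | some cols =>
              simp only [Option.map_some]
              have hstep : ∀ c', fGo a b l m (t ++ [c']) (i + 1) = pick a (t ++ [c']) cols := by
                intro c'
                rw [ih (t ++ [c']) (i + 1), hW]
              simp only [hstep]
              exact (pick_cons a t (c :: cs) cols).symm

-- every column collected by the walk is nonempty
theorem walk_nonempty (b : List (List String)) (l : Int) :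
    ∀ (fuel : Nat) (j : Int) (cols : List (List String)),
      walkCols b l fuel j = some (some cols) → ∀ col ∈ cols, col ≠ [] := by
  intro fuel
  induction fuel with
  | zero =>
    intro j cols h
    rw [walkCols] at h
    by_cases hj : j = l
    · rw [if_pos hj] at h
      simp only [Option.some.injEq] at h
      subst h
      simp
    · rw [if_neg hj] at h
      simp at h
  | succ m ih =>
    intro j cols h
    rw [walkCols] at h
    by_cases hj : j = l
    · rw [if_pos hj] at h
      simp only [Option.some.injEq] at h
      subst h
      simp
    · rw [if_neg hj] at h
      cases hg : PySem.List.pyGet? b j with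
      | none => rw [hg] at h; simp at h
      | some col =>
        cases col with
        | nil => rw [hg] at h; simp at h
        | cons c cs =>
          rw [hg] at h
          cases hW : walkCols b l m (j + 1) with
          | none => rw [hW] at h; simp at h
          | some o =>
            cases o with
            | none => rw [hW] at h; simp at h
            | some cols' =>
              rw [hW] at h
              simp only [Option.map_some, Option.some.injEq] at h
              subst h
              intro col hcol
              rcases List.mem_cons.1 hcol with rfl | hmem
              · simp
              · exact ih (j + 1) cols' hW col hmem

theorem map_getD_range (l : List String) :
    (List.range l.length).map (fun d => l.getD d "") = l := by
  induction l with
  | nil => simp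
  | cons x xs ih =>
    rw [List.length_cons, List.range_succ_eq_map, List.map_cons, List.map_map]
    simp only [List.getD_cons_zero, Function.comp_def, Nat.succ_eq_add_one, List.getD_cons_succ]
    rw [ih]

-- one decode step peeled off, arithmetically
theorem digits_cons (col : List String) (rest : List (List String)) (hlc : 0 < col.length)
    (p' d e : Nat) (he : e < p') :
    digits (col :: rest) (((d * p' + e : Nat) : Int)) (((col.length * p' : Nat) : Int))
      = col.getD d "" :: digits rest ((e : Nat) : Int) ((p' : Nat) : Int) := by
  have hp' : 0 < p' := Nat.lt_of_le_of_lt (Nat.zero_le e) he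
  have hsplit : d * p' + e = p' * d + e := by ring
  simp only [digits]
  have h1 : PySem.Int.floordiv ((col.length * p' : Nat) : Int) (col.length : Int)
      = ((p' : Nat) : Int) := by
    rw [PySem.Int.floordiv_natCast, Nat.mul_div_cancel_left p' hlc]
  rw [h1]
  have h2 : PySem.Int.floordiv ((d * p' + e : Nat) : Int) ((p' : Nat) : Int) = ((d : Nat) : Int) := by
    rw [PySem.Int.floordiv_natCast]
    congr 1
    rw [hsplit, Nat.mul_add_div hp', Nat.div_eq_of_lt he, Nat.add_zero]
  have h3 : PySem.Int.mod ((d * p' + e : Nat) : Int) ((p' : Nat) : Int) = ((e : Nat) : Int) := by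
    rw [PySem.Int.mod_natCast]
    congr 1
    rw [hsplit, Nat.mul_add_mod, Nat.mod_eq_of_lt he]
  rw [h2, h3, Int.toNat_natCast]

-- arithmetic unranking enumerates exactly prodCols, in order
theorem unrank_eq_prodCols :
    ∀ cols : List (List String), (∀ col ∈ cols, col ≠ []) →
      (List.range (colProd cols)).map
          (fun k : Nat => digits cols ((k : Nat) : Int) ((colProd cols : Nat) : Int))
        = prodCols cols := by
  intro cols
  induction cols with
  | nil => intro _; simp [colProd, digits, prodCols, List.range_one]
  | cons col rest ih =>
    intro hne
    have hcol : col ≠ [] := hne col (by simp)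
    have hlc : 0 < col.length := List.length_pos_iff.2 hcol
    have hrest : ∀ c ∈ rest, c ≠ [] := fun c hc => hne c (List.mem_cons_of_mem _ hc)
    have hcp : colProd (col :: rest) = col.length * colProd rest := by
      simp [colProd]
    rw [hcp, range_mul_flatMap, List.map_flatMap]
    simp only [List.map_map]
    rw [prodCols]
    conv_rhs => rw [← map_getD_range col]
    rw [List.flatMap_map]
    congr 1
    funext d
    simp only [Function.comp_def]
    rw [List.map_congr_left
      (fun e he' => digits_cons col rest hlc (colProd rest) d e (List.mem_range.1 he'))]
    rw [show (fun e : Nat => col.getD d "" :: digits rest ((e : Nat) : Int) ((colProd rest : Nat) : Int))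
        = (fun tl => col.getD d "" :: tl) ∘
            (fun e : Nat => digits rest ((e : Nat) : Int) ((colProd rest : Nat) : Int)) from rfl,
      ← List.map_map, ih hrest]

-- B's enumeration phase equals the prodCols scan
theorem f_alt_eq (a : List String) (b : List (List String)) (l : Int) (t : List String) (i : Int) :
    f_alt a b l t i
      = match walkCols b l (((b.length : Int) - i).toNat + 1) i with
        | none => none
        | some none => none
        | some (some cols) => pick a t cols := by
  unfold f_alt
  cases hW : walkCols b l (((b.length : Int) - i).toNat + 1) i with
  | none => rfl
  | some o =>
    cases o with
    | none => rfl
    | some cols =>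
      simp only []
      have hnon := walk_nonempty b l (((b.length : Int) - i).toNat + 1) i cols hW
      rw [foldl_mul_len cols 1, one_mul, PySem.List.pyRange_zero_nat, List.findSome?_map]
      rw [pick, ← unrank_eq_prodCols cols hnon, List.findSome?_map]
      congr 1
      funext k
      simp only [Function.comp_def, decodeTail, decodeTail_eq_digits, List.nil_append]

-- ===== VERDICT (by name: the statement is the Claim_ definition above) =====
theorem f_spec : Claim_equal_f := by
  intro a b l t i _ _
  unfold Spec_f
  rw [f_alt_eq]
  unfold f
  exact fGo_eq a b l (((b.length : Int) - i).toNat + 1) t i
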